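-- pv_equiv track=rewrite | github.com/mhendzel2/3DIA | src/scientific_analyzer.py | create_label_overlay
-- ===== SOURCE A (Python) =====
-- def create_label_overlay(image, labels):
--     """Create colored overlay of labels on original image"""
--     height, width = len(image), len(image[0])
--     overlay = [[image[i][j] for j in range(width)] for i in range(height)]
--
--     # Find unique labels
--     unique_labels = set()
--     for row in labels:
--         unique_labels.update(row)
--     unique_labels.discard(0)
--
--     # Add colored borders
--     for i in range(height):
--         for j in range(width):
--             if labels[i][j] != 0:
--                 # Check if pixel is on boundary
--                 is_boundary = False
--                 for di, dj in [(-1, 0), (1, 0), (0, -1), (0, 1)]: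
--                     ni, nj = i + di, j + dj
--                     if (ni < 0 or ni >= height or nj < 0 or nj >= width or
--                         labels[ni][nj] != labels[i][j]):
--                         is_boundary = True
--                         break
--                 if is_boundary:
--                     overlay[i][j] = min(255, overlay[i][j] + 100)
--
--     return overlay
-- ===== SOURCE B (Python) =====
-- def _run_edges(seq):
--     """Boundary mask of one line by run-length segmentation: split the line
--     into maximal runs of equal values and mark the two endpoints of each run."""
--     n = len(seq)
--     mask = [False] * n
--     start = 0
--     for j in range(1, n + 1):
--         if j == n or seq[j] != seq[j - 1]:
--             mask[start] = True
--             mask[j - 1] = True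
--             start = j
--     return mask
--
--
-- def create_label_overlay(image, labels):
--     """Create colored overlay of labels on original image"""
--     height, width = len(image), len(image[0])
--     lab = [[labels[i][j] for j in range(width)] for i in range(height)]
--     row_edges = [_run_edges(row) for row in lab]
--     cols = [[lab[i][j] for i in range(height)] for j in range(width)]
--     col_edges = [_run_edges(col) for col in cols]
--     return [[min(255, image[i][j] + 100)
--              if lab[i][j] != 0 and (row_edges[i][j] or col_edges[j][i])
--              else image[i][j]
--              for j in range(width)] for i in range(height)]
-- ===== Notes on version B (the rewrite author's own statement) =====
-- stated objective: alternative
-- what changed: Replaces A's per-pixel scan over the four neighbor offsets by a run-length decomposition: each row and each column is segmented into maximal runs of equal labels and only the two endpoints of every run are marked as boundary; a nonzero pixel is brightened iff it is a row-run endpoint or a column-run endpoint; the unused unique_labels set is dropped.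
import Mathlib
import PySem

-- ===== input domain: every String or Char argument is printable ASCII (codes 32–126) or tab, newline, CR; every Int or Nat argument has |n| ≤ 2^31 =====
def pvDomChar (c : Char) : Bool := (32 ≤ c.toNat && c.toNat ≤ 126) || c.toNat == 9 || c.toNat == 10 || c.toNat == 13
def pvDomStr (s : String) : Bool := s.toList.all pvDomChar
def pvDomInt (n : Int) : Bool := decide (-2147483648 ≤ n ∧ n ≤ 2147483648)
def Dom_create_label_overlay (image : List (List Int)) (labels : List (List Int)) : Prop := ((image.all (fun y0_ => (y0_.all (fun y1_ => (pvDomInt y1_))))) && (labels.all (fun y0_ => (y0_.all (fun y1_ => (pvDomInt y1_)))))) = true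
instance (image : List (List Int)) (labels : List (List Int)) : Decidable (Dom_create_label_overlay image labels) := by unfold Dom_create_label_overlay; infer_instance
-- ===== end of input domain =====

-- B replaces A's per-pixel 4-neighbor scan by run-length segmentation of every row
-- and every column of the label grid, marking only the two endpoints of each maximal
-- run of equal labels (objective: alternative algorithm; A's unused unique_labels set
-- is dropped in B).

-- ===== PORT A =====
-- g[i][j] for nonnegative in-range indices (default outside; Python raises only outside Pre_)
def pvCell (g : List (List Int)) (i j : Nat) : Int := (g.getD i []).getD j 0

-- the body of A's per-direction boundary test (the disjuncts in A's `if`, in order)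
def pvADiff (labels : List (List Int)) (h w i j : Nat) (d : Int × Int) : Bool :=
  let ni : Int := (i : Int) + d.1
  let nj : Int := (j : Int) + d.2
  decide (ni < 0) || decide ((h : Int) ≤ ni) || decide (nj < 0) || decide ((w : Int) ≤ nj) ||
    decide (pvCell labels ni.toNat nj.toNat ≠ pvCell labels i j)

def create_label_overlay (image : List (List Int)) (labels : List (List Int)) : List (List Int) :=
  let h := image.length
  let w := (image.getD 0 []).length
  let overlay := (List.range h).map (fun i => (List.range w).map (fun j => pvCell image i j))
  -- unused in A, kept for fidelity
  let _unique_labels := PySem.Set.discard (labels.foldl (fun s row => PySem.Set.update s row) PySem.Set.empty) 0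
  (List.range h).foldl (fun ov i =>
    (List.range w).foldl (fun ov j =>
      if pvCell labels i j ≠ 0 then
        -- is_boundary: loop over the four offsets with early break = any
        if [((-1 : Int), (0 : Int)), (1, 0), (0, -1), (0, 1)].any (pvADiff labels h w i j) then
          ov.modify i (fun row => row.modify j (fun v => min 255 (v + 100)))
        else ov
      else ov) ov) overlay

-- ===== PORT B =====
-- the body of _run_edges' loop over j ∈ range(1, n+1): state = (mask, start)
def pvREBody (seq : List Int) (st : List Bool × Nat) (j : Nat) : List Bool × Nat :=
  if j = seq.length ∨ seq.getD j 0 ≠ seq.getD (j-1) 0 then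
    ((st.1.set st.2 true).set (j-1) true, j)
  else st

-- B's `_run_edges(seq)`: mark the endpoints of every maximal run of equal values
def pvRunEdges (seq : List Int) : List Bool :=
  ((List.range' 1 seq.length).foldl (pvREBody seq)
    (List.replicate seq.length false, 0)).1

def create_label_overlay_alt (image : List (List Int)) (labels : List (List Int)) : List (List Int) :=
  let h := image.length
  let w := (image.getD 0 []).length
  let lab := (List.range h).map (fun i => (List.range w).map (fun j => pvCell labels i j))
  let row_edges := lab.map pvRunEdges
  let cols := (List.range w).map (fun j => (List.range h).map (fun i => pvCell lab i j))
  let col_edges := cols.map pvRunEdges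
  (List.range h).map (fun i => (List.range w).map (fun j =>
    if decide (pvCell lab i j ≠ 0) &&
        ((row_edges.getD i []).getD j false || (col_edges.getD j []).getD i false)
    then min 255 (pvCell image i j + 100) else pvCell image i j))

-- ===== PRECONDITION & SPEC =====
-- Pre_ excludes exactly the inputs where Python A raises IndexError: empty image, or
-- (when the first image row is nonempty) an image row shorter than the first row or
-- labels lacking a read row/column; with an empty first row nothing is ever indexed.
def Pre_create_label_overlay (image : List (List Int)) (labels : List (List Int)) : Prop :=
  image ≠ [] ∧
  ((image.getD 0 []).length = 0 ∨
    ((∀ row ∈ image, (image.getD 0 []).length ≤ row.length) ∧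
     image.length ≤ labels.length ∧
     (∀ row ∈ labels.take image.length, (image.getD 0 []).length ≤ row.length)))

instance (image : List (List Int)) (labels : List (List Int)) : Decidable (Pre_create_label_overlay image labels) := by
  unfold Pre_create_label_overlay; infer_instance

def pvWitness_create_label_overlay : List (List Int) × List (List Int) := ([[7, 8], [9, 10]], [[1, 0], [1, 2]])

def Spec_create_label_overlay (image : List (List Int)) (labels : List (List Int)) (out : List (List Int)) : Prop := out = create_label_overlay_alt image labels
instance (image : List (List Int)) (labels : List (List Int)) (out : List (List Int)) : Decidable (Spec_create_label_overlay image labels out) := by unfold Spec_create_label_overlay; infer_instance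

-- ===== CLAIM (what is proved, stated in full; the proofs are below) =====
def Claim_equal_create_label_overlay : Prop := ∀ (image : List (List Int)) (labels : List (List Int)), Dom_create_label_overlay image labels → Pre_create_label_overlay image labels → Spec_create_label_overlay image labels (create_label_overlay image labels)

-- ===== LEMMAS AND PROOFS =====

-- the grid has h rows, each of length w
def pvShape (g : List (List Int)) (h w : Nat) : Prop :=
  g.length = h ∧ ∀ i < h, (g.getD i []).length = w

-- j is a run endpoint of seq (left end or right end of a maximal run of equal values)
def pvEdge (seq : List Int) (j : Nat) : Bool :=
  (decide (j = 0) || decide (seq.getD (j-1) 0 ≠ seq.getD j 0)) ||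
  (decide (j+1 = seq.length) || decide (seq.getD (j+1) 0 ≠ seq.getD j 0))

-- start index of the maximal run containing position t
def pvRunStart (seq : List Int) : Nat → Nat
  | 0 => 0
  | t+1 => if seq.getD (t+1) 0 ≠ seq.getD t 0 then t+1 else pvRunStart seq t

lemma pv_getD_map_range {α : Type} (d : α) (f : Nat → α) {n i : Nat} (hi : i < n) :
    ((List.range n).map f).getD i d = f i := by
  simp [List.getD, hi]

lemma pv_getD_eq_getElem {α : Type} (l : List α) (d : α) {i : Nat} (hi : i < l.length) :
    l.getD i d = l[i] := by
  simp [List.getD_eq_getElem?_getD, List.getElem?_eq_getElem hi]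

lemma pv_getD_map {α β : Type} (f : α → β) (l : List α) (d : α) (d' : β) {i : Nat}
    (hi : i < l.length) : (l.map f).getD i d' = f (l.getD i d) := by
  rw [pv_getD_eq_getElem _ _ (by simpa using hi), pv_getD_eq_getElem _ _ hi]
  simp

lemma pv_getD_modify_ne {α : Type} (l : List α) {i j : Nat} (f : α → α) (d : α) (hij : i ≠ j) :
    (l.modify i f).getD j d = l.getD j d := by
  simp [List.getD_eq_getElem?_getD, hij]

lemma pv_getD_modify_self {α : Type} (l : List α) {i : Nat} (f : α → α) (d : α) (hi : i < l.length) :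
    (l.modify i f).getD i d = f (l.getD i d) := by
  simp [List.getD_eq_getElem?_getD, List.getElem?_eq_getElem hi]

lemma pv_getD_set {α : Type} (l : List α) (i k : Nat) (a d : α) :
    (l.set i a).getD k d = if i = k ∧ i < l.length then a else l.getD k d := by
  by_cases hik : i = k
  · subst hik
    by_cases hl : i < l.length
    · simp [List.getD_eq_getElem?_getD, hl]
    · rw [if_neg (fun hh => hl hh.2)]
      simp [List.getD_eq_getElem?_getD, hl]
  · rw [if_neg (fun hh => hik hh.1)]
    simp [List.getD_eq_getElem?_getD, hik]

lemma pv_row_modify (g : List (List Int)) (i i' : Nat) (F : List Int → List Int) :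
    (g.modify i F).getD i' [] = if i = i' ∧ i < g.length then F (g.getD i' []) else g.getD i' [] := by
  by_cases hii : i = i'
  · subst hii
    by_cases hlen : i < g.length
    · rw [pv_getD_modify_self _ _ _ hlen, if_pos ⟨rfl, hlen⟩]
    · rw [if_neg (fun hh => hlen hh.2)]
      have h1 : (g.modify i F)[i]? = Option.none := List.getElem?_eq_none (by simp; omega)
      have h2 : g[i]? = Option.none := List.getElem?_eq_none (by omega)
      rw [List.getD_eq_getElem?_getD, h1, List.getD_eq_getElem?_getD, h2]
  · rw [pv_getD_modify_ne _ _ _ hii, if_neg (fun hh => hii hh.1)]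

lemma pv_cell_mk (f : Nat → Nat → Int) {h w i j : Nat} (hi : i < h) (hj : j < w) :
    pvCell ((List.range h).map fun i => (List.range w).map (f i)) i j = f i j := by
  unfold pvCell
  rw [pv_getD_map_range _ _ hi, pv_getD_map_range _ _ hj]

lemma pv_shape_mk (f : Nat → Nat → Int) (h w : Nat) :
    pvShape ((List.range h).map fun i => (List.range w).map (f i)) h w := by
  refine ⟨by simp, fun i hi => ?_⟩
  rw [pv_getD_map_range _ _ hi]
  simp

lemma pv_shape_modify (g : List (List Int)) (h w i j : Nat) (f : Int → Int)
    (hs : pvShape g h w) :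
    pvShape (g.modify i fun row => row.modify j f) h w := by
  obtain ⟨hl, hr⟩ := hs
  refine ⟨by simp [hl], fun i' hi' => ?_⟩
  rw [pv_row_modify]
  split_ifs with hcase
  · obtain ⟨rfl, -⟩ := hcase
    show ((g.getD i []).modify j f).length = w
    rw [List.length_modify]
    exact hr i hi'
  · exact hr i' hi'

lemma pv_cell_modify_self (g : List (List Int)) (h w i j : Nat) (f : Int → Int)
    (hs : pvShape g h w) (hi : i < h) (hj : j < w) :
    pvCell (g.modify i fun row => row.modify j f) i j = f (pvCell g i j) := by
  obtain ⟨hl, hr⟩ := hs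
  unfold pvCell
  rw [pv_row_modify, if_pos ⟨rfl, by omega⟩]
  rw [pv_getD_modify_self _ _ _ (by rw [hr i hi]; omega)]

lemma pv_cell_modify_ne (g : List (List Int)) (i j i' j' : Nat) (f : Int → Int)
    (hne : i' ≠ i ∨ j' ≠ j) :
    pvCell (g.modify i fun row => row.modify j f) i' j' = pvCell g i' j' := by
  unfold pvCell
  rw [pv_row_modify]
  split_ifs with hcase
  · obtain ⟨rfl, -⟩ := hcase
    rw [pv_getD_modify_ne _ _ _ (by omega)]
  · rfl

-- A's inner (column) loop characterized pointwise
lemma pv_innerA (cond : Nat → Nat → Bool) (h w i : Nat) (hi : i < h)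
    (ov : List (List Int)) (hs : pvShape ov h w) (n : Nat) (hn : n ≤ w) :
    pvShape ((List.range n).foldl (fun ov j =>
        if cond i j then ov.modify i (fun row => row.modify j (fun v => min 255 (v + 100))) else ov) ov) h w ∧
    ∀ i' j', pvCell ((List.range n).foldl (fun ov j =>
        if cond i j then ov.modify i (fun row => row.modify j (fun v => min 255 (v + 100))) else ov) ov) i' j'
      = if i' = i ∧ j' < n ∧ cond i' j' then min 255 (pvCell ov i' j' + 100) else pvCell ov i' j' := by
  induction n with
  | zero => exact ⟨hs, by simp⟩
  | succ n ih =>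
    obtain ⟨ihs, ihc⟩ := ih (by omega)
    rw [List.range_succ, List.foldl_append, List.foldl_cons, List.foldl_nil]
    by_cases hc : cond i n
    · rw [if_pos hc]
      refine ⟨pv_shape_modify _ _ _ _ _ _ ihs, fun i' j' => ?_⟩
      by_cases hij : i' = i ∧ j' = n
      · rw [hij.1, hij.2]
        rw [pv_cell_modify_self _ h w _ _ _ ihs hi (by omega)]
        rw [ihc]
        rw [if_neg (show ¬(i = i ∧ n < n ∧ cond i n = true) from fun hh => absurd hh.2.1 (lt_irrefl n)),
            if_pos (show i = i ∧ n < n + 1 ∧ cond i n = true from ⟨rfl, Nat.lt_succ_self n, hc⟩)]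
      · rw [pv_cell_modify_ne _ _ _ _ _ _ (by omega)]
        rw [ihc]
        apply if_congr _ rfl rfl
        constructor
        · rintro ⟨h1, h2, h3⟩
          exact ⟨h1, by omega, h3⟩
        · rintro ⟨h1, h2, h3⟩
          exact ⟨h1, by omega, h3⟩
    · rw [if_neg hc]
      refine ⟨ihs, fun i' j' => ?_⟩
      rw [ihc]
      apply if_congr _ rfl rfl
      constructor
      · rintro ⟨h1, h2, h3⟩
        exact ⟨h1, by omega, h3⟩
      · rintro ⟨h1, h2, h3⟩
        refine ⟨h1, ?_, h3⟩
        rcases Nat.lt_succ_iff_lt_or_eq.mp h2 with hlt | heq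
        · exact hlt
        · exfalso
          apply hc
          rw [← h1, ← heq]
          exact h3

-- A's outer (row) loop characterized pointwise
lemma pv_outerA (cond : Nat → Nat → Bool) (h w : Nat)
    (ov : List (List Int)) (hs : pvShape ov h w) (m : Nat) (hm : m ≤ h) :
    pvShape ((List.range m).foldl (fun ov i =>
        (List.range w).foldl (fun ov j =>
          if cond i j then ov.modify i (fun row => row.modify j (fun v => min 255 (v + 100))) else ov) ov) ov) h w ∧
    ∀ i' j', pvCell ((List.range m).foldl (fun ov i =>
        (List.range w).foldl (fun ov j =>
          if cond i j then ov.modify i (fun row => row.modify j (fun v => min 255 (v + 100))) else ov) ov) ov) i' j'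
      = if i' < m ∧ j' < w ∧ cond i' j' then min 255 (pvCell ov i' j' + 100) else pvCell ov i' j' := by
  induction m with
  | zero => exact ⟨hs, by simp⟩
  | succ m ih =>
    obtain ⟨ihs, ihc⟩ := ih (by omega)
    rw [List.range_succ, List.foldl_append, List.foldl_cons, List.foldl_nil]
    obtain ⟨sh, sc⟩ := pv_innerA cond h w m (by omega) _ ihs w (le_refl w)
    refine ⟨sh, fun i' j' => ?_⟩
    rw [sc, ihc]
    by_cases hii : i' = m
    · rw [hii]
      rw [if_neg (show ¬(m < m ∧ j' < w ∧ cond m j' = true) from fun hh => absurd hh.1 (lt_irrefl m))]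
      apply if_congr _ rfl rfl
      constructor
      · rintro ⟨-, h2, h3⟩
        exact ⟨Nat.lt_succ_self m, h2, h3⟩
      · rintro ⟨-, h2, h3⟩
        exact ⟨rfl, h2, h3⟩
    · rw [if_neg (show ¬(i' = m ∧ j' < w ∧ cond i' j' = true) from fun hh => hii hh.1)]
      apply if_congr _ rfl rfl
      constructor
      · rintro ⟨h1, h2, h3⟩
        exact ⟨by omega, h2, h3⟩
      · rintro ⟨h1, h2, h3⟩
        exact ⟨by omega, h2, h3⟩

-- ---- B side: the run-marking loop ----

lemma pv_runStart_le (seq : List Int) (t : Nat) : pvRunStart seq t ≤ t := by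
  induction t with
  | zero => simp [pvRunStart]
  | succ t ih =>
    unfold pvRunStart
    split_ifs with hc
    · exact le_refl _
    · omega

lemma pv_runStart_const (seq : List Int) (t : Nat) :
    ∀ k, pvRunStart seq t ≤ k → k ≤ t → seq.getD k 0 = seq.getD t 0 := by
  induction t with
  | zero =>
    intro k h1 h2
    have : k = 0 := by omega
    rw [this]
  | succ t ih =>
    intro k h1 h2
    unfold pvRunStart at h1
    split_ifs at h1 with hcv
    · have hk : k = t+1 := by omega
      rw [hk]
    · push_neg at hcv
      by_cases hk : k = t+1
      · rw [hk]
      · rw [ih k h1 (by omega), ← hcv]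

lemma pv_runStart_left (seq : List Int) (t : Nat) :
    pvRunStart seq t = 0 ∨ seq.getD (pvRunStart seq t - 1) 0 ≠ seq.getD (pvRunStart seq t) 0 := by
  induction t with
  | zero => left; simp [pvRunStart]
  | succ t ih =>
    unfold pvRunStart
    split_ifs with hc
    · right
      simpa using hc.symm
    · exact ih

-- the combinatorial heart: after the run ending at t is closed, exactly the
-- endpoints up to t are marked
lemma pv_edge_window (seq : List Int) (t : Nat) (ht : t < seq.length)
    (hc : t+1 = seq.length ∨ seq.getD (t+1) 0 ≠ seq.getD t 0) (k : Nat) :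
    (decide (k < t+1) && pvEdge seq k)
      = (if t = k then true else if pvRunStart seq t = k then true
         else (decide (k < pvRunStart seq t) && pvEdge seq k)) := by
  have hrsle := pv_runStart_le seq t
  by_cases hkt : k = t
  · subst hkt
    rw [if_pos rfl]
    have : pvEdge seq k = true := by
      unfold pvEdge
      rcases hc with hc | hc
      · rw [decide_eq_true hc]
        simp
      · rw [decide_eq_true hc]
        simp
    rw [this, decide_eq_true (show k < k + 1 by omega)]
    rfl
  · rw [if_neg (fun hh => hkt hh.symm)]
    by_cases hkr : k = pvRunStart seq t
    · rw [if_pos hkr.symm]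
      have : pvEdge seq k = true := by
        subst hkr
        unfold pvEdge
        rcases pv_runStart_left seq t with h0 | hne
        · rw [decide_eq_true h0]
          simp
        · rw [decide_eq_true hne]
          simp
      rw [this, decide_eq_true (show k < t + 1 by omega)]
      rfl
    · rw [if_neg (fun hh => hkr hh.symm)]
      by_cases hlt : k < pvRunStart seq t
      · rw [decide_eq_true hlt, decide_eq_true (show k < t+1 by omega)]
      · -- k > rs, k ≠ t: either k > t (both sides false) or rs < k < t (edge is false)
        rw [decide_eq_false hlt, Bool.false_and]
        by_cases hgt : t < k
        · rw [decide_eq_false (show ¬ k < t+1 by omega), Bool.false_and]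
        · -- rs < k < t : interior of the run
          have hk1 : pvRunStart seq t ≤ k - 1 := by omega
          have hk2 : k - 1 ≤ t := by omega
          have hk3 : pvRunStart seq t ≤ k + 1 := by omega
          have hk4 : k + 1 ≤ t := by omega
          have e1 : seq.getD (k-1) 0 = seq.getD t 0 := pv_runStart_const seq t _ hk1 hk2
          have e2 : seq.getD k 0 = seq.getD t 0 := pv_runStart_const seq t _ (by omega) (by omega)
          have e3 : seq.getD (k+1) 0 = seq.getD t 0 := pv_runStart_const seq t _ hk3 hk4
          have hedge : pvEdge seq k = false := by
            unfold pvEdge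
            rw [e1, e2, e3]
            simp [show k ≠ 0 by omega, show ¬ k + 1 = seq.length by omega]
          simp [hedge]

-- loop invariant for _run_edges' fold, up to (but not including) the final j = n step
lemma pv_loop_inv (seq : List Int) (t : Nat) (ht : t < seq.length) :
    ((List.range' 1 t).foldl (pvREBody seq) (List.replicate seq.length false, 0)).2
        = pvRunStart seq t ∧
    (((List.range' 1 t).foldl (pvREBody seq) (List.replicate seq.length false, 0)).1).length
        = seq.length ∧
    ∀ k, (((List.range' 1 t).foldl (pvREBody seq) (List.replicate seq.length false, 0)).1).getD k false
        = (decide (k < pvRunStart seq t) && pvEdge seq k) := by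
  induction t with
  | zero =>
    refine ⟨by simp [pvRunStart], by simp, fun k => ?_⟩
    simp [pvRunStart, List.getD_eq_getElem?_getD, List.getElem?_replicate]
    split_ifs <;> rfl
  | succ t ih =>
    obtain ⟨ih2, ihl, ihm⟩ := ih (by omega)
    rw [List.range'_1_concat, List.foldl_append, List.foldl_cons, List.foldl_nil]
    set S := (List.range' 1 t).foldl (pvREBody seq) (List.replicate seq.length false, 0) with hS
    unfold pvREBody
    rw [show 1 + t = t + 1 from by omega]
    simp only [Nat.add_sub_cancel]
    by_cases hc : (t + 1 = seq.length ∨ seq.getD (t+1) 0 ≠ seq.getD t 0)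
    · have hc' : seq.getD (t+1) 0 ≠ seq.getD t 0 := by
        rcases hc with h | h
        · exact absurd h (by omega)
        · exact h
      rw [if_pos hc]
      have hrs : pvRunStart seq (t+1) = t + 1 := by
        unfold pvRunStart; rw [if_pos hc']
      refine ⟨by rw [hrs], by simp [ihl], fun k => ?_⟩
      simp only
      rw [pv_getD_set, pv_getD_set]
      simp only [List.length_set]
      rw [ih2, ihl, hrs]
      have hwin := (pv_edge_window seq t (by omega) hc k).symm
      have hrsl : pvRunStart seq t < seq.length := by
        have := pv_runStart_le seq t
        omega
      by_cases hkt : t = k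
      · rw [if_pos ⟨hkt, by omega⟩]
        rw [if_pos hkt] at hwin
        exact hwin
      · rw [if_neg (fun hh => hkt hh.1)]
        rw [if_neg hkt] at hwin
        by_cases hkr : pvRunStart seq t = k
        · rw [if_pos ⟨hkr, hrsl⟩]
          rw [if_pos hkr] at hwin
          exact hwin
        · rw [if_neg (fun hh => hkr hh.1), ihm k]
          rw [if_neg hkr] at hwin
          exact hwin
    · push_neg at hc
      rw [if_neg (by
        intro h
        rcases h with h | h
        · exact hc.1 h
        · exact h hc.2)]
      have hrs : pvRunStart seq (t+1) = pvRunStart seq t := by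
        show (if seq.getD (t+1) 0 ≠ seq.getD t 0 then t+1 else pvRunStart seq t) = pvRunStart seq t
        rw [if_neg (not_not_intro hc.2)]
      exact ⟨by rw [ih2, hrs], ihl, fun k => by rw [ihm k, hrs]⟩

-- _run_edges marks exactly the run endpoints
lemma pv_runEdges_getD (seq : List Int) (k : Nat) (hk : k < seq.length) :
    (pvRunEdges seq).getD k false = pvEdge seq k := by
  unfold pvRunEdges
  obtain ⟨n, hn⟩ : ∃ n, seq.length = n + 1 := ⟨seq.length - 1, by omega⟩
  obtain ⟨ih2, ihl, ihm⟩ := pv_loop_inv seq n (by omega)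
  have hsplit : List.range' 1 seq.length = List.range' 1 n ++ [1 + n] := by
    rw [hn, List.range'_1_concat]
  rw [hsplit, List.foldl_append, List.foldl_cons, List.foldl_nil]
  set S := (List.range' 1 n).foldl (pvREBody seq) (List.replicate seq.length false, 0) with hS
  unfold pvREBody
  rw [show 1 + n = n + 1 from by omega]
  simp only [Nat.add_sub_cancel]
  rw [if_pos (Or.inl hn.symm)]
  simp only
  rw [pv_getD_set, pv_getD_set]
  simp only [List.length_set]
  rw [ih2, ihl]
  have hwin := (pv_edge_window seq n (by omega) (Or.inl hn.symm) k).symm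
  rw [decide_eq_true (show k < n + 1 by omega), Bool.true_and] at hwin
  have hrsl : pvRunStart seq n < seq.length := by
    have := pv_runStart_le seq n
    omega
  by_cases hkt : n = k
  · rw [if_pos ⟨hkt, by omega⟩]
    rw [if_pos hkt] at hwin
    exact hwin
  · rw [if_neg (fun hh => hkt hh.1)]
    rw [if_neg hkt] at hwin
    by_cases hkr : pvRunStart seq n = k
    · rw [if_pos ⟨hkr, hrsl⟩]
      rw [if_pos hkr] at hwin
      exact hwin
    · rw [if_neg (fun hh => hkr hh.1), ihm k]
      rw [if_neg hkr] at hwin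
      exact hwin

-- pvEdge of a row of the label grid = A's left/right neighbor tests
lemma pv_edge_horiz (labels : List (List Int)) (h w i j : Nat) (hi : i < h) (hj : j < w) :
    pvEdge ((List.range w).map (fun j' => pvCell labels i j')) j
      = (pvADiff labels h w i j (0, -1) || pvADiff labels h w i j (0, 1)) := by
  unfold pvEdge pvADiff
  simp only [List.length_map, List.length_range]
  rw [pv_getD_map_range 0 _ hj, pv_getD_map_range 0 _ (show j - 1 < w by omega)]
  rw [decide_eq_false (show ¬ ((i:Int) + 0 < 0) by omega),
      decide_eq_false (show ¬ ((h:Int) ≤ (i:Int) + 0) by omega),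
      Bool.false_or, Bool.false_or]
  have ht1 : ((i:Int) + 0).toNat = i := by omega
  have ht2 : ((j:Int) + (-1)).toNat = j - 1 := by omega
  have ht3 : ((j:Int) + 1).toNat = j + 1 := by omega
  rw [ht1, ht2, ht3]
  rw [show decide ((j:Int) + (-1) < 0) = decide (j = 0) from decide_eq_decide.mpr (by omega),
      decide_eq_false (show ¬ ((w:Int) ≤ (j:Int) + (-1)) by omega), Bool.false_or,
      decide_eq_false (show ¬ ((j:Int) + 1 < 0) by omega), Bool.false_or,
      show decide ((w:Int) ≤ (j:Int) + 1) = decide (j + 1 = w) from decide_eq_decide.mpr (by omega)]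
  by_cases hj1 : j + 1 = w
  · simp [hj1, ne_comm]
  · rw [pv_getD_map_range 0 _ (show j + 1 < w by omega)]
    simp [hj1, ne_comm]

-- pvEdge of a column of the label grid = A's up/down neighbor tests
lemma pv_edge_vert (labels : List (List Int)) (h w i j : Nat) (hi : i < h) (hj : j < w) :
    pvEdge ((List.range h).map (fun i' => pvCell labels i' j)) i
      = (pvADiff labels h w i j (-1, 0) || pvADiff labels h w i j (1, 0)) := by
  unfold pvEdge pvADiff
  simp only [List.length_map, List.length_range]
  rw [pv_getD_map_range 0 _ hi, pv_getD_map_range 0 _ (show i - 1 < h by omega)]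
  have ht1 : ((i:Int) + (-1)).toNat = i - 1 := by omega
  have ht2 : ((j:Int) + 0).toNat = j := by omega
  have ht3 : ((i:Int) + 1).toNat = i + 1 := by omega
  rw [ht1, ht2, ht3]
  rw [show decide ((i:Int) + (-1) < 0) = decide (i = 0) from decide_eq_decide.mpr (by omega),
      decide_eq_false (show ¬ ((h:Int) ≤ (i:Int) + (-1)) by omega),
      decide_eq_false (show ¬ ((j:Int) + 0 < 0) by omega),
      decide_eq_false (show ¬ ((w:Int) ≤ (j:Int) + 0) by omega),
      decide_eq_false (show ¬ ((i:Int) + 1 < 0) by omega),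
      show decide ((h:Int) ≤ (i:Int) + 1) = decide (i + 1 = h) from decide_eq_decide.mpr (by omega)]
  simp only [Bool.false_or]
  by_cases hi1 : i + 1 = h
  · simp [hi1, ne_comm]
  · rw [pv_getD_map_range 0 _ (show i + 1 < h by omega)]
    simp [hi1, ne_comm]

-- the two fully-expanded computations agree
lemma pv_main (image labels : List (List Int)) :
    create_label_overlay image labels = create_label_overlay_alt image labels := by
  unfold create_label_overlay create_label_overlay_alt
  simp only []
  set h := image.length with hh
  set w := (image.getD 0 []).length with hw
  set dirs : List (Int × Int) := [((-1 : Int), (0 : Int)), (1, 0), (0, -1), (0, 1)] with hdirs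
  set cond : Nat → Nat → Bool := fun i j =>
    decide (pvCell labels i j ≠ 0) && dirs.any (pvADiff labels h w i j) with hcond
  set lab := (List.range h).map (fun i => (List.range w).map (fun j => pvCell labels i j)) with hlab
  set overlay := (List.range h).map (fun i => (List.range w).map (fun j => pvCell image i j)) with hov
  -- rewrite A's loop body into guarded-modify form
  have hbody : (fun (ov : List (List Int)) (i : Nat) =>
      (List.range w).foldl (fun ov j =>
        if pvCell labels i j ≠ 0 then
          if dirs.any (pvADiff labels h w i j) then
            ov.modify i (fun row => row.modify j (fun v => min 255 (v + 100)))
          else ov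
        else ov) ov)
      = (fun (ov : List (List Int)) (i : Nat) =>
      (List.range w).foldl (fun ov j =>
        if cond i j then ov.modify i (fun row => row.modify j (fun v => min 255 (v + 100))) else ov) ov) := by
    funext ov i
    congr 1
    funext ov j
    by_cases h1 : pvCell labels i j ≠ 0 <;> by_cases h2 : dirs.any (pvADiff labels h w i j) <;>
      simp [hcond, h1, h2]
  rw [hbody]
  obtain ⟨⟨alen, arow⟩, acell⟩ :=
    pv_outerA cond h w overlay (pv_shape_mk (fun i j => pvCell image i j) h w) h (le_refl h)
  -- columns of lab are columns of labels (within the grid)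
  have hcols : ∀ j < w, (List.range h).map (fun i => pvCell lab i j)
      = (List.range h).map (fun i => pvCell labels i j) := by
    intro j hj
    apply List.map_congr_left
    intro i hi
    rw [List.mem_range] at hi
    rw [hlab, pv_cell_mk _ hi hj]
  -- B's condition equals A's
  have hcondB : ∀ i < h, ∀ j < w,
      (decide (pvCell lab i j ≠ 0) &&
        (((lab.map pvRunEdges).getD i []).getD j false ||
         ((((List.range w).map (fun j => (List.range h).map (fun i => pvCell lab i j))).map
             pvRunEdges).getD j []).getD i false)) = cond i j := by
    intro i hi j hj
    rw [hlab, pv_cell_mk _ hi hj]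
    rw [pv_getD_map pvRunEdges _ [] [] (by simp [hi])]
    rw [show ((List.range h).map (fun i => (List.range w).map (fun j => pvCell labels i j))).getD i []
          = (List.range w).map (fun j => pvCell labels i j) from pv_getD_map_range [] _ hi]
    rw [pv_getD_map pvRunEdges _ [] [] (by simp [hj])]
    rw [show ((List.range w).map (fun j => (List.range h).map (fun i => pvCell lab i j))).getD j []
          = (List.range h).map (fun i => pvCell lab i j) from pv_getD_map_range [] _ hj]
    rw [hcols j hj]
    rw [pv_runEdges_getD _ j (by simp [hj]), pv_runEdges_getD _ i (by simp [hi])]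
    rw [pv_edge_horiz labels h w i j hi hj, pv_edge_vert labels h w i j hi hj]
    rw [hcond]
    simp only [hdirs, List.any_cons, List.any_nil, Bool.or_false]
    congr 1
    cases pvADiff labels h w i j (-1, 0) <;> cases pvADiff labels h w i j (1, 0) <;>
      cases pvADiff labels h w i j (0, -1) <;> cases pvADiff labels h w i j (0, 1) <;> rfl
  apply List.ext_getElem
  · simp [alen]
  · intro i hi1 hi2
    have hih : i < h := by simpa [alen] using hi1
    apply List.ext_getElem
    · rw [← pv_getD_eq_getElem _ [] hi1, arow i hih]
      simp
    · intro j hj1 hj2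
      have hjw : j < w := by
        have hrl := arow i hih
        rw [pv_getD_eq_getElem _ [] hi1] at hrl
        omega
      have hcell : (((List.range h).foldl (fun ov i =>
          (List.range w).foldl (fun ov j =>
            if cond i j then ov.modify i (fun row => row.modify j (fun v => min 255 (v + 100))) else ov) ov) overlay))[i][j]
          = pvCell ((List.range h).foldl (fun ov i =>
          (List.range w).foldl (fun ov j =>
            if cond i j then ov.modify i (fun row => row.modify j (fun v => min 255 (v + 100))) else ov) ov) overlay) i j := by
        unfold pvCell
        rw [pv_getD_eq_getElem _ [] hi1]
        exact (pv_getD_eq_getElem _ _ hj1).symm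
      rw [hcell, acell i j]
      rw [hov, pv_cell_mk (fun i j => pvCell image i j) hih hjw]
      simp only [List.getElem_map, List.getElem_range]
      rw [hcondB i hih j hjw]
      by_cases hc : cond i j
      · rw [if_pos ⟨hih, hjw, hc⟩, if_pos hc]
      · rw [if_neg (fun hhh => hc hhh.2.2), if_neg hc]

-- ===== VERDICT (by name: the statement is the Claim_ definition above) =====
theorem create_label_overlay_spec : Claim_equal_create_label_overlay := by
  intro image labels _ _
  show create_label_overlay image labels = create_label_overlay_alt image labels
  exact pv_main image labels
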